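-- pv_equiv track=rewrite | github.com/lcscs12345/riboss | scripts/riboss.py | top_3_frames
-- ===== SOURCE A (Python) =====
-- def all_orf(seq):
--     triplet = ""
--     for i in range(0, len(seq)-2, 3):
--         triplet = seq[i:(i+3)]
--         if triplet in ["TAG", "TAA", "TGA"]:
--             return seq[:i+3]
--     return seq
--
-- def top_3_frames(seq):
--     positions = []
--     orf = ""
--     for i in range(0, len(seq)):
--         triplet = seq[i:i+3]
--         if(triplet == "ATG"):
--             orf = all_orf(seq[i:])
--             positions.append([i, i + len(orf)])
--     return positions
-- ===== SOURCE B (Python) =====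
-- def top_3_frames(seq):
--     # Single backward pass: e3 always holds the ORF end for frame position i+3,
--     # so each ATG's end is read off directly instead of rescanning the suffix.
--     n = len(seq)
--     stops = ("TAG", "TAA", "TGA")
--     e1 = e2 = e3 = n
--     res = []
--     for i in range(n - 1, -1, -1):
--         cod = seq[i:i+3]
--         e0 = n if i > n - 3 else (i + 3 if cod in stops else e3)
--         if cod == "ATG":
--             res.append([i, e0])
--         e1, e2, e3 = e0, e1, e2
--     res.reverse()
--     return res
-- ===== Notes on version B (the rewrite author's own statement) =====
-- stated objective: alternative
-- what changed: A rescans the suffix from every ATG to find its in-frame stop codon; B makes one backward pass over the sequence carrying the next in-frame ORF end for each of the three frames, reading each ATG's end off in O(1).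
import Mathlib
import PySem

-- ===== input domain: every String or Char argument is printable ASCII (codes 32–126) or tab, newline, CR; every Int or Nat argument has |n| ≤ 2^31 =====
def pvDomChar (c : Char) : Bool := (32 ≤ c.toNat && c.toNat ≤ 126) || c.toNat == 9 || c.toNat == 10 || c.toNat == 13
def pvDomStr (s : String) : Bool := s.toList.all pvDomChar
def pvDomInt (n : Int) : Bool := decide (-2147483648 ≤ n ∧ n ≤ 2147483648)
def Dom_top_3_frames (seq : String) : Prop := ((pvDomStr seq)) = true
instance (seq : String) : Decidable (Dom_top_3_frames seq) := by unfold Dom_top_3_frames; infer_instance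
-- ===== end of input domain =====

-- B replaces A's per-ATG forward rescan for a stop codon by one backward pass that
-- carries the next in-frame ORF end for each frame (an alternative single-pass algorithm).

-- ===== PORT A =====
def pvStopsA : List (List Char) := [['T','A','G'], ['T','A','A'], ['T','G','A']]

def all_orf_go (seq : List Char) : List Int → List Char
  | [] => seq
  | i :: rest =>
    if PySem.List.slice seq (some i) (some (i + 3)) ∈ pvStopsA then
      PySem.List.slice seq none (some (i + 3))
    else all_orf_go seq rest

def all_orf (seq : List Char) : List Char :=
  all_orf_go seq (PySem.List.pyRange 0 ((seq.length : Int) - 2) 3)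

def top_3_frames (seq : String) : List (List Int) :=
  let s := seq.toList
  (PySem.List.pyRange 0 (s.length : Int) 1).foldl (fun positions i =>
    if PySem.List.slice s (some i) (some (i + 3)) = ['A','T','G'] then
      positions ++ [[i, i + ((all_orf (PySem.List.slice s (some i) none)).length : Int)]]
    else positions) []

-- ===== PORT B =====
def pvAltStep (s : List Char) (n : Int) (st : Int × Int × Int × List (List Int)) (i : Int) :
    Int × Int × Int × List (List Int) :=
  let cod := PySem.List.slice s (some i) (some (i + 3))
  let e0 := if i > n - 3 then n
    else if cod ∈ [['T','A','G'], ['T','A','A'], ['T','G','A']] then i + 3 else st.2.2.1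
  (e0, st.1, st.2.1, if cod = ['A','T','G'] then st.2.2.2 ++ [[i, e0]] else st.2.2.2)

def top_3_frames_alt (seq : String) : List (List Int) :=
  let s := seq.toList
  let n : Int := s.length
  ((PySem.List.pyRange (n - 1) (-1) (-1)).foldl (pvAltStep s n) (n, n, n, [])).2.2.2.reverse

-- ===== PRECONDITION & SPEC =====
def Spec_top_3_frames (seq : String) (out : List (List Int)) : Prop := out = top_3_frames_alt seq
instance (seq : String) (out : List (List Int)) : Decidable (Spec_top_3_frames seq out) := by unfold Spec_top_3_frames; infer_instance

-- ===== CLAIM (what is proved, stated in full; the proofs are below) =====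
def Claim_equal_top_3_frames : Prop := ∀ (seq : String), Dom_top_3_frames seq → Spec_top_3_frames seq (top_3_frames seq)

-- ===== LEMMAS AND PROOFS =====

/-- `i + length of A's ORF from position i` (capped to the string for out-of-range `i`). -/
def Ebar (s : List Char) (i : Nat) : Int :=
  ((min i s.length : Nat) : Int) + ((all_orf (List.drop (min i s.length) s)).length : Int)

theorem all_orf_nil : all_orf ([] : List Char) = [] := rfl

theorem Ebar_ge (s : List Char) (i : Nat) (h : s.length ≤ i) : Ebar s i = (s.length : Int) := by
  unfold Ebar
  rw [min_eq_right h, List.drop_length, all_orf_nil]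
  simp

theorem pyRange3_nil (b : Int) (h : b ≤ 0) : PySem.List.pyRange 0 b 3 = [] := by
  rw [PySem.List.pyRange_of_pos 0 b (by norm_num)]
  rw [if_neg (by omega)]
  simp

theorem pyRange3_cons (a b : Int) (h : a < b) :
    PySem.List.pyRange a b 3 = a :: PySem.List.pyRange (a + 3) b 3 := by
  rw [PySem.List.pyRange_of_pos a b (by norm_num),
      PySem.List.pyRange_of_pos (a + 3) b (by norm_num)]
  have hn : ((b - a + 3 - 1) / 3).toNat
      = (if a + 3 < b then ((b - (a + 3) + 3 - 1) / 3).toNat else 0) + 1 := by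
    split_ifs with h2 <;> omega
  rw [if_pos h, hn, List.range_succ_eq_map]
  simp only [List.map_cons, List.map_map]
  congr 1
  · simp
  · apply List.map_congr_left
    intro k _
    simp [Function.comp]
    ring

theorem pyRange3_shift (b : Int) :
    PySem.List.pyRange 3 b 3 = (PySem.List.pyRange 0 (b - 3) 3).map (fun i => i + 3) := by
  rw [PySem.List.pyRange_of_pos 3 b (by norm_num),
      PySem.List.pyRange_of_pos 0 (b - 3) (by norm_num)]
  have hc : (3:Int) < b ↔ 0 < b - 3 := by omega
  by_cases h3 : (3:Int) < b
  · rw [if_pos h3, if_pos (hc.mp h3), List.map_map]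
    have hcnt : b - 3 - 0 + 3 - 1 = b - 3 + 3 - 1 := by ring
    rw [hcnt]
    apply List.map_congr_left
    intro k _
    simp [Function.comp]
    ring
  · rw [if_neg h3, if_neg (fun h => h3 (hc.mpr h))]
    simp

theorem mem_pyRange3_nonneg (b i : Int) (h : i ∈ PySem.List.pyRange 0 b 3) : 0 ≤ i := by
  rw [PySem.List.pyRange_of_pos 0 b (by norm_num)] at h
  obtain ⟨k, _, hk⟩ := List.mem_map.mp h
  omega

theorem all_orf_short (t : List Char) (h : t.length < 3) : all_orf t = t := by
  unfold all_orf
  rw [pyRange3_nil _ (by omega)]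
  rfl

theorem slice_nat3 (t : List Char) (j : Nat) :
    PySem.List.slice t (some (j : Int)) (some ((j : Int) + 3)) = (t.drop j).take 3 := by
  have h3 : ((j : Int) + 3) = ((j : Int) + ((3 : Nat) : Int)) := by push_cast; ring
  rw [h3, PySem.List.slice_natCast_add]

theorem all_orf_go_shift (t : List Char) (l : List Int) (hl : ∀ i ∈ l, 0 ≤ i) :
    all_orf_go t (l.map (fun i => i + 3)) = t.take 3 ++ all_orf_go (t.drop 3) l := by
  induction l with
  | nil => simp [all_orf_go, List.take_append_drop]
  | cons i rest ih =>
    have hi : 0 ≤ i := hl i (List.mem_cons_self ..)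
    simp only [List.map_cons, all_orf_go]
    have hsl : PySem.List.slice t (some (i + 3)) (some (i + 3 + 3))
        = PySem.List.slice (t.drop 3) (some i) (some (i + 3)) := by
      rw [PySem.List.slice_toNat _ (by omega) (by omega),
          PySem.List.slice_toNat _ hi (by omega), List.drop_drop]
      congr 1
      · omega
      · congr 1
        omega
    rw [hsl]
    by_cases hs : PySem.List.slice (t.drop 3) (some i) (some (i + 3)) ∈ pvStopsA
    · rw [if_pos hs, if_pos hs]
      rw [PySem.List.slice_to _ (by omega), PySem.List.slice_to _ (by omega)]
      have h4 : (i + 3 + 3).toNat = 3 + (i + 3).toNat := by omega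
      rw [h4, List.take_add]
    · rw [if_neg hs, if_neg hs]
      exact ih (fun x hx => hl x (List.mem_cons_of_mem _ hx))

theorem all_orf_step (t : List Char) (h : 3 ≤ t.length) :
    all_orf t = if t.take 3 ∈ pvStopsA then t.take 3 else t.take 3 ++ all_orf (t.drop 3) := by
  unfold all_orf
  rw [pyRange3_cons 0 ((t.length : Int) - 2) (by omega)]
  simp only [all_orf_go]
  have h0 : PySem.List.slice t (some 0) (some (0 + 3)) = t.take 3 := by
    have := slice_nat3 t 0
    simpa using this
  rw [h0]
  by_cases hs : t.take 3 ∈ pvStopsA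
  · rw [if_pos hs, if_pos hs]
    rw [PySem.List.slice_to _ (by norm_num)]
    congr 1
  · rw [if_neg hs, if_neg hs]
    have hr : (0 : Int) + 3 = 3 := by norm_num
    rw [hr, pyRange3_shift, all_orf_go_shift t _ (fun i hi => mem_pyRange3_nonneg _ i hi)]
    have hlen : ((t.drop 3).length : Int) - 2 = (t.length : Int) - 2 - 3 := by
      simp [List.length_drop]; omega
    rw [← hlen]

theorem Ebar_eq_of_lt (s : List Char) (j : Nat) (h : j < s.length) :
    Ebar s j = (j : Int) + ((all_orf (List.drop j s)).length : Int) := by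
  unfold Ebar
  rw [min_eq_left (by omega)]

theorem Ebar_short (s : List Char) (j : Nat) (h1 : j ≤ s.length) (h2 : s.length < j + 3) :
    Ebar s j = (s.length : Int) := by
  rcases Nat.eq_or_lt_of_le h1 with h | h
  · exact Ebar_ge s j (le_of_eq h.symm)
  · rw [Ebar_eq_of_lt s j h, all_orf_short _ (by simp [List.length_drop]; omega)]
    simp [List.length_drop]
    omega

theorem Ebar_rec (s : List Char) (j : Nat) (h : j + 3 ≤ s.length) :
    Ebar s j = if (s.drop j).take 3 ∈ pvStopsA then (j : Int) + 3 else Ebar s (j + 3) := by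
  rw [Ebar_eq_of_lt s j (by omega), all_orf_step (s.drop j) (by simp [List.length_drop]; omega)]
  by_cases hs : (s.drop j).take 3 ∈ pvStopsA
  · rw [if_pos hs, if_pos hs]
    have : ((s.drop j).take 3).length = 3 := by simp [List.length_take, List.length_drop]; omega
    rw [this]
    push_cast
    ring
  · rw [if_neg hs, if_neg hs]
    rcases Nat.eq_or_lt_of_le h with he | hlt
    · rw [Ebar_ge s (j + 3) (le_of_eq he.symm)]
      have : (s.drop j).drop 3 = s.drop (j + 3) := by rw [List.drop_drop, Nat.add_comm]
      rw [List.length_append, this]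
      have h3 : ((s.drop j).take 3).length = 3 := by
        simp [List.length_take, List.length_drop]; omega
      rw [h3, all_orf_short _ (by simp [List.length_drop]; omega)]
      simp [List.length_drop]
      omega
    · rw [Ebar_eq_of_lt s (j + 3) hlt]
      have hd : (s.drop j).drop 3 = s.drop (j + 3) := by rw [List.drop_drop, Nat.add_comm]
      rw [List.length_append, hd]
      have h3 : ((s.drop j).take 3).length = 3 := by
        simp [List.length_take, List.length_drop]; omega
      rw [h3]
      push_cast
      ring

/-- B's backward loop invariant. -/
theorem altLoop (s : List Char) : ∀ (j : Nat), j ≤ s.length → ∀ (res : List (List Int)),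
    (PySem.List.pyRange ((j : Int) - 1) (-1) (-1)).foldl (pvAltStep s (s.length : Int))
      (Ebar s j, Ebar s (j + 1), Ebar s (j + 2), res)
    = (Ebar s 0, Ebar s 1, Ebar s 2,
        res ++ (((PySem.List.pyRange 0 (j : Int) 1).filter
            (fun i => PySem.List.slice s (some i) (some (i + 3)) = ['A','T','G'])).map
          (fun i => ([i, Ebar s i.toNat] : List Int))).reverse) := by
  intro j
  induction j with
  | zero =>
    intro _ res
    rw [PySem.List.pyRange_neg_one_eq_nil (by norm_num),
        PySem.List.pyRange_one_eq_nil (by norm_num)]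
    simp
  | succ j ih =>
    intro hj res
    have hj' : j < s.length := by omega
    have hstep : ((j : Int) + 1 - 1) = (j : Int) := by ring
    rw [show (((j : Nat) + 1 : Nat) : Int) = (j : Int) + 1 by push_cast; ring, hstep,
        PySem.List.pyRange_neg_one_cons (by omega), List.foldl_cons]
    have hcod : PySem.List.slice s (some (j : Int)) (some ((j : Int) + 3)) = (s.drop j).take 3 :=
      slice_nat3 s j
    have hE : (if (j : Int) > (s.length : Int) - 3 then ((s.length : Nat) : Int)
          else if (s.drop j).take 3 ∈ [['T','A','G'], ['T','A','A'], ['T','G','A']] then (j : Int) + 3 else Ebar s (j + 3))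
        = Ebar s j := by
      by_cases hbig : (j : Int) > (s.length : Int) - 3
      · rw [if_pos hbig, Ebar_short s j (by omega) (by omega)]
      · rw [if_neg hbig, show ([['T','A','G'], ['T','A','A'], ['T','G','A']] : List (List Char)) = pvStopsA from rfl,
            Ebar_rec s j (by omega)]
    have he0 : pvAltStep s (s.length : Int) (Ebar s (j + 1), Ebar s (j + 2), Ebar s (j + 3), res) (j : Int)
        = (Ebar s j, Ebar s (j + 1), Ebar s (j + 2),
           if (s.drop j).take 3 = ['A','T','G'] then res ++ [[(j : Int), Ebar s j]] else res) := by
      unfold pvAltStep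
      simp only [hcod]
      rw [hE]
    rw [show Ebar s (j + 1 + 1) = Ebar s (j + 2) by norm_num,
        show Ebar s (j + 1 + 2) = Ebar s (j + 3) by norm_num, he0,
        ih (by omega) _]
    congr 2
    rw [PySem.List.pyRange_one_succ_right (by omega)]
    rw [List.filter_append, List.map_append, List.reverse_append]
    simp only [List.filter_cons, List.filter_nil]
    rw [hcod]
    by_cases hA : (s.drop j).take 3 = ['A','T','G']
    · rw [if_pos hA]
      simp only [decide_eq_true_eq, hA]
      simp [Int.toNat_natCast, List.append_assoc]
    · rw [if_neg hA]
      simp only [decide_eq_true_eq]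
      rw [if_neg hA]
      simp

theorem alt_char (seq : String) :
    top_3_frames_alt seq
    = ((PySem.List.pyRange 0 (seq.toList.length : Int) 1).filter
        (fun i => PySem.List.slice seq.toList (some i) (some (i + 3)) = ['A','T','G'])).map
      (fun i => ([i, Ebar seq.toList i.toNat] : List Int)) := by
  unfold top_3_frames_alt
  simp only []
  have h0 := altLoop seq.toList seq.toList.length le_rfl []
  rw [Ebar_ge _ _ le_rfl, Ebar_ge _ _ (by omega), Ebar_ge _ _ (by omega)] at h0
  rw [h0]
  simp

theorem a_char (seq : String) :
    top_3_frames seq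
    = ((PySem.List.pyRange 0 (seq.toList.length : Int) 1).filter
        (fun i => PySem.List.slice seq.toList (some i) (some (i + 3)) = ['A','T','G'])).map
      (fun i => ([i, i + ((all_orf (PySem.List.slice seq.toList (some i) none)).length : Int)] : List Int)) := by
  unfold top_3_frames
  simp only []
  have h := PySem.List.foldl_append_if
    (fun i => decide (PySem.List.slice seq.toList (some i) (some (i + 3)) = ['A','T','G']))
    (fun i => ([i, i + ((all_orf (PySem.List.slice seq.toList (some i) none)).length : Int)] : List Int))
    (PySem.List.pyRange 0 (seq.toList.length : Int) 1) []
  simp only [decide_eq_true_eq] at h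
  rw [h]
  simp

-- ===== VERDICT (by name: the statement is the Claim_ definition above) =====
theorem top_3_frames_spec : Claim_equal_top_3_frames := by
  intro seq _
  unfold Spec_top_3_frames
  rw [a_char, alt_char]
  apply List.map_congr_left
  intro i hi
  have hmem := List.mem_filter.mp hi
  have hrange := (PySem.List.mem_pyRange_one).mp hmem.1
  have h0 : 0 ≤ i := hrange.1
  have hlt : i < (seq.toList.length : Int) := hrange.2
  have hnat : ((i.toNat : Nat) : Int) = i := Int.toNat_of_nonneg h0
  rw [Ebar_eq_of_lt seq.toList i.toNat (by omega)]
  rw [PySem.List.slice_from _ h0]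
  rw [hnat]
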